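-- pv_equiv track=rewrite | github.com/MizanZero/code | Leet/1790.py | areAlmostEqual
-- ===== SOURCE A (Python) =====
-- def areAlmostEqual(s1: str, s2: str) -> bool:
--     l1 = list(s1); l2 = list(s2)
--     l1.sort(); l2.sort()
--     if l1 != l2: return False
--     n = len(s1)
--     diff = 0
--     i=0
--
--     while i<n:
--         if s1[i] != s2[i] : diff+=1
--         i+=1
--
--     return False if diff>2 else True
-- ===== SOURCE B (Python) =====
-- def areAlmostEqual(s1: str, s2: str) -> bool:
--     if len(s1) != len(s2):
--         return False
--     diffs = [i for i in range(len(s1)) if s1[i] != s2[i]]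
--     if not diffs:
--         return True
--     if len(diffs) == 2:
--         i, j = diffs
--         return s1[i] == s2[j] and s1[j] == s2[i]
--     return False
-- ===== Notes on version B (the rewrite author's own statement) =====
-- stated objective: simpler
-- what changed: Replaces the sort-based anagram test plus a separate diff-counting pass by a single pass that collects the differing indices and checks the swap directly (empty list, or exactly two crosswise-equal positions).
import Mathlib
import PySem

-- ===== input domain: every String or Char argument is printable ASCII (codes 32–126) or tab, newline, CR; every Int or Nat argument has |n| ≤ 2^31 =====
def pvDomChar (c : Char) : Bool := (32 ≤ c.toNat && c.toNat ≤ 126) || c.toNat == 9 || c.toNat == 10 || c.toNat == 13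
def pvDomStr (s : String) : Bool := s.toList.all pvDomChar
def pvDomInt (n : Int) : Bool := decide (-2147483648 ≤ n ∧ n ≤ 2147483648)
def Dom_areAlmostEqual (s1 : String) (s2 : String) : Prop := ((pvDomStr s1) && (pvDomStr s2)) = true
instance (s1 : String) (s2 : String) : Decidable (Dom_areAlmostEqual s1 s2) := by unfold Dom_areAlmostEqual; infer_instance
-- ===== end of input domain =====

-- B replaces A's sort-based anagram test plus diff-counting pass by one pass collecting the
-- differing indices and checking the swap directly (objective: simpler; both return values agree).

-- ===== PORT A =====
-- l1 = sorted(list(s1)), l2 = sorted(list(s2)); if l1 != l2: return False;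
-- then a while loop counts positions where s1[i] != s2[i]; return diff <= 2.
-- (s2[i] is only read after the sorted lists compared equal, so i is in range for s2 too;
--  comparing the `l[i]?` options is exact there.)
def areAlmostEqual (s1 : String) (s2 : String) : Bool :=
  let l1 := PySem.List.sorted s1.toList (fun x => x) false
  let l2 := PySem.List.sorted s2.toList (fun x => x) false
  if l1 ≠ l2 then false
  else
    let n := s1.toList.length
    let diff := (List.range n).foldl
      (fun d i => if s1.toList[i]? ≠ s2.toList[i]? then d + 1 else d) 0
    if diff > 2 then false else true

-- ===== PORT B =====
-- length guard, one pass collecting differing indices, then check the swap directly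
-- (indices produced by the pass are in range, so `getD` reads are exact).
def areAlmostEqual_alt (s1 : String) (s2 : String) : Bool :=
  let a := s1.toList
  let b := s2.toList
  if a.length ≠ b.length then false
  else
    match (List.range a.length).filter (fun i => a.getD i ' ' ≠ b.getD i ' ') with
    | [] => true
    | [i, j] => a.getD i ' ' == b.getD j ' ' && a.getD j ' ' == b.getD i ' '
    | _ => false

-- ===== PRECONDITION & SPEC =====
def Spec_areAlmostEqual (s1 : String) (s2 : String) (out : Bool) : Prop := out = areAlmostEqual_alt s1 s2
instance (s1 : String) (s2 : String) (out : Bool) : Decidable (Spec_areAlmostEqual s1 s2 out) := by unfold Spec_areAlmostEqual; infer_instance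

-- ===== CLAIM (what is proved, stated in full; the proofs are below) =====
def Claim_equal_areAlmostEqual : Prop := ∀ (s1 : String) (s2 : String), Dom_areAlmostEqual s1 s2 → Spec_areAlmostEqual s1 s2 (areAlmostEqual s1 s2)

-- ===== LEMMAS AND PROOFS =====

-- counting loop = length of the filtered list
theorem pv_foldl_count {p : Nat → Prop} [DecidablePred p] (l : List Nat) (init : Nat) :
    l.foldl (fun d i => if p i then d + 1 else d) init = init + (l.filter (fun i => decide (p i))).length := by
  induction l generalizing init with
  | nil => simp
  | cons x t ih =>
    by_cases h : p x <;> simp [List.filter_cons, h, ih] <;> omega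

-- positional formulation of List.count
theorem pv_count_pos (l : List Char) (c : Char) :
    l.count c = ((List.range l.length).map (fun i => if l.getD i ' ' = c then 1 else 0)).sum := by
  induction l with
  | nil => simp
  | cons x t ih =>
    rw [List.length_cons, List.range_succ_eq_map, List.map_cons, List.map_map, List.sum_cons]
    have hcomp : ((fun i => if (x :: t).getD i ' ' = c then 1 else 0) ∘ Nat.succ)
        = (fun i => if t.getD i ' ' = c then 1 else 0) := by
      funext i; simp [List.getD_cons_succ]
    rw [hcomp, List.count_cons, ← ih, List.getD_cons_zero]
    by_cases h : x = c <;> simp [h] <;> omega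

-- splitting a mapped sum along a predicate
theorem pv_sum_split (l : List Nat) (p : Nat → Bool) (f : Nat → Nat) :
    (l.map f).sum = ((l.filter p).map f).sum + ((l.filter (fun i => !p i)).map f).sum := by
  induction l with
  | nil => simp
  | cons x t ih =>
    by_cases h : p x <;> simp [List.filter_cons, h, ih] <;> omega

-- if f and g agree wherever p is false, the full sums agree iff the p-part sums agree
theorem pv_sum_iff (l : List Nat) (p : Nat → Bool) (f g : Nat → Nat)
    (hfg : ∀ i ∈ l, p i = false → f i = g i) :
    (l.map f).sum = (l.map g).sum ↔ ((l.filter p).map f).sum = ((l.filter p).map g).sum := by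
  have hrest : (l.filter (fun i => !p i)).map f = (l.filter (fun i => !p i)).map g := by
    apply List.map_congr_left
    intro i hi
    rcases List.mem_filter.mp hi with ⟨hil, hpi⟩
    exact hfg i hil (by simpa using hpi)
  rw [pv_sum_split l p f, pv_sum_split l p g, hrest]
  omega

-- the exactly-two-differing-positions case: equal per-character 0/1 sums force the crosswise equalities
theorem pv_pair (x y u v : Char) (hx : x ≠ u) (hy : y ≠ v)
    (h : ∀ c : Char, ((if x = c then 1 else 0) + ((if y = c then 1 else 0) + 0) : Nat)
        = (if u = c then 1 else 0) + ((if v = c then 1 else 0) + 0)) : x = v ∧ y = u := by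
  have h1 := h x
  rw [if_pos rfl, if_neg (Ne.symm hx)] at h1
  have e1 : v = x := by
    by_cases ev : v = x
    · exact ev
    · rw [if_neg ev] at h1; split_ifs at h1 <;> omega
  have hyx : y ≠ x := by
    intro e
    rw [if_pos e, if_pos e1] at h1
    omega
  have hvy : v ≠ y := fun e => hyx (e ▸ e1)
  have h2 := h y
  rw [if_neg (fun e => hyx e.symm), if_pos rfl, if_neg hvy] at h2
  have e2 : u = y := by
    by_cases eu : u = y
    · exact eu
    · rw [if_neg eu] at h2; omega
  exact ⟨e1.symm, e2.symm⟩

-- the whole equivalence, over the underlying character lists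
theorem pv_core (a b : List Char) :
    (let l1 := PySem.List.sorted a (fun x => x) false
     let l2 := PySem.List.sorted b (fun x => x) false
     if l1 ≠ l2 then false
     else
       let n := a.length
       let diff := (List.range n).foldl (fun d i => if a[i]? ≠ b[i]? then d + 1 else d) 0
       if diff > 2 then false else true) =
    (if a.length ≠ b.length then false
     else
       match (List.range a.length).filter (fun i => a.getD i ' ' ≠ b.getD i ' ') with
       | [] => true
       | [i, j] => a.getD i ' ' == b.getD j ' ' && a.getD j ' ' == b.getD i ' '
       | _ => false) := by
  dsimp only
  by_cases hlen : b.length = a.length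
  case neg =>
    -- lengths differ: sorted lists cannot be equal (they would be a permutation)
    have hs : PySem.List.sorted a (fun x => x) false ≠ PySem.List.sorted b (fun x => x) false := by
      intro h
      exact hlen (((PySem.List.sorted_id_eq_sorted_id_iff_perm _ _).mp h).length_eq.symm)
    have hlen' : a.length ≠ b.length := fun h => hlen h.symm
    simp [hs, hlen']
  case pos =>
    -- A's diff counter equals the length of the differing-index list
    have hdiff : (List.range a.length).foldl (fun d i => if a[i]? ≠ b[i]? then d + 1 else d) 0
        = ((List.range a.length).filter (fun i => a.getD i ' ' ≠ b.getD i ' ')).length := by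
      rw [pv_foldl_count (List.range a.length) 0]
      have hfil : (List.range a.length).filter (fun i => decide (a[i]? ≠ b[i]?))
          = (List.range a.length).filter (fun i => a.getD i ' ' ≠ b.getD i ' ') := by
        apply List.filter_congr
        intro i hi
        have hin : i < a.length := List.mem_range.mp hi
        have ha : a[i]? = some (a.getD i ' ') := by
          rw [List.getD_eq_getElem a ' ' hin]; exact List.getElem?_eq_getElem hin
        have hb : b[i]? = some (b.getD i ' ') := by
          have hib : i < b.length := by omega
          rw [List.getD_eq_getElem b ' ' hib]; exact List.getElem?_eq_getElem hib
        rw [ha, hb]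
        simp only [ne_eq, Option.some.injEq]
      rw [hfil]
      omega
    -- membership facts for the differing-index list
    have hmemD : ∀ i ∈ (List.range a.length).filter
        (fun i => a.getD i ' ' ≠ b.getD i ' '), i < a.length ∧ a.getD i ' ' ≠ b.getD i ' ' := by
      intro i hi
      rcases List.mem_filter.mp hi with ⟨hir, hpi⟩
      exact ⟨List.mem_range.mp hir, by simpa using hpi⟩
    -- permutation ↔ the per-character 0/1 sums over the differing indices agree
    have hperm_iff : a.Perm b ↔
        ∀ c, (((List.range a.length).filter (fun i => a.getD i ' ' ≠ b.getD i ' ')).map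
                (fun i => if a.getD i ' ' = c then 1 else 0)).sum
            = (((List.range a.length).filter (fun i => a.getD i ' ' ≠ b.getD i ' ')).map
                (fun i => if b.getD i ' ' = c then 1 else 0)).sum := by
      rw [List.perm_iff_count]
      have hoff : ∀ (c : Char) (i : Nat), i ∈ List.range a.length →
          (fun i => decide (a.getD i ' ' ≠ b.getD i ' ')) i = false →
          (if a.getD i ' ' = c then 1 else 0) = (if b.getD i ' ' = c then (1:Nat) else 0) := by
        intro c i _ hpi
        have heq : a.getD i ' ' = b.getD i ' ' := by simpa using hpi
        rw [heq]
      constructor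
      · intro h c
        have hc := h c
        rw [pv_count_pos a c, pv_count_pos b c, hlen] at hc
        exact (pv_sum_iff (List.range a.length)
          (fun i => decide (a.getD i ' ' ≠ b.getD i ' ')) _ _ (hoff c)).mp hc
      · intro h c
        rw [pv_count_pos a c, pv_count_pos b c, hlen]
        exact (pv_sum_iff (List.range a.length)
          (fun i => decide (a.getD i ' ' ≠ b.getD i ' ')) _ _ (hoff c)).mpr (h c)
    -- case analysis on the differing-index list
    generalize hDval : (List.range a.length).filter
        (fun i => a.getD i ' ' ≠ b.getD i ' ') = D at hdiff hmemD hperm_iff ⊢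
    have hlen' : ¬ a.length ≠ b.length := fun h => h hlen.symm
    obtain _ | ⟨i, _ | ⟨j, _ | ⟨k, rest⟩⟩⟩ := D
    · -- no differing position: a = b
      have hab : a = b := by
        apply List.ext_getElem (by omega)
        intro i hi hib
        have hni : ¬ ((fun i => decide (a.getD i ' ' ≠ b.getD i ' ')) i = true) := by
          intro hpi
          have : i ∈ ([] : List Nat) := hDval ▸ List.mem_filter.mpr ⟨List.mem_range.mpr hi, hpi⟩
          simp at this
        have hpi : a.getD i ' ' = b.getD i ' ' := by simpa using hni
        rwa [List.getD_eq_getElem a ' ' hi, List.getD_eq_getElem b ' ' hib] at hpi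
      have hsort : PySem.List.sorted a (fun x => x) false = PySem.List.sorted b (fun x => x) false := by
        rw [hab]
      rw [hdiff]
      simp [hsort, hlen']
    · -- exactly one differing position: not a permutation, both sides False
      obtain ⟨hi, hne⟩ := hmemD i (by simp)
      have hnperm : ¬ a.Perm b := by
        intro h
        have h1 := (hperm_iff.mp h) (a.getD i ' ')
        simp [Ne.symm hne] at h1
        simp only [List.getD_eq_getElem?_getD] at hne
        exact hne h1.symm
      have hsort : PySem.List.sorted a (fun x => x) false ≠ PySem.List.sorted b (fun x => x) false := by
        intro h; exact hnperm ((PySem.List.sorted_id_eq_sorted_id_iff_perm _ _).mp h)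
      simp [hsort, hlen']
    · -- two differing positions: permutation ↔ crosswise equality
      obtain ⟨hi, hnei⟩ := hmemD i (by simp)
      obtain ⟨hj, hnej⟩ := hmemD j (by simp)
      have hcross : a.Perm b ↔ (a.getD i ' ' = b.getD j ' ' ∧ a.getD j ' ' = b.getD i ' ') := by
        rw [hperm_iff]
        constructor
        · intro h
          exact pv_pair (a.getD i ' ') (a.getD j ' ') (b.getD i ' ') (b.getD j ' ') hnei hnej
            (fun c => by simpa using h c)
        · rintro ⟨e1, e2⟩ c
          simp only [List.map_cons, List.map_nil, List.sum_cons, List.sum_nil]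
          rw [e1, e2]
          split_ifs <;> omega
      by_cases hpab : a.Perm b
      · have hsort : PySem.List.sorted a (fun x => x) false = PySem.List.sorted b (fun x => x) false :=
          (PySem.List.sorted_id_eq_sorted_id_iff_perm _ _).mpr hpab
        obtain ⟨e1, e2⟩ := hcross.mp hpab
        simp only [List.getD_eq_getElem?_getD] at e1 e2
        rw [hdiff]
        simp [hsort, hlen', e1, e2]
      · have hsort : PySem.List.sorted a (fun x => x) false ≠ PySem.List.sorted b (fun x => x) false := by
          intro h; exact hpab ((PySem.List.sorted_id_eq_sorted_id_iff_perm _ _).mp h)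
        have hncross : ¬ (a.getD i ' ' = b.getD j ' ' ∧ a.getD j ' ' = b.getD i ' ') :=
          fun h => hpab (hcross.mpr h)
        simp only [List.getD_eq_getElem?_getD] at hncross
        simp [hsort, hlen']
        intro e1 e2
        exact hncross ⟨e1, e2⟩
    · -- three or more differing positions: A's diff exceeds 2, both sides False
      by_cases hsort : PySem.List.sorted a (fun x => x) false = PySem.List.sorted b (fun x => x) false
      · rw [hdiff]
        simp [hsort, hlen']
      · simp [hsort, hlen']

theorem pv_A_eq (s1 s2 : String) :
    areAlmostEqual s1 s2 = areAlmostEqual_alt s1 s2 := by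
  unfold areAlmostEqual areAlmostEqual_alt
  exact pv_core s1.toList s2.toList

-- ===== VERDICT (by name: the statement is the Claim_ definition above) =====
theorem areAlmostEqual_spec : Claim_equal_areAlmostEqual := by
  intro s1 s2 _
  unfold Spec_areAlmostEqual
  exact pv_A_eq s1 s2
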